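-- pv_equiv track=rewrite | github.com/plasmatic1/competitive-programming-dotfiles | tools/gen_old.py | colinear
-- ===== SOURCE A (Python) =====
-- def cross(p1, p2):
--     return p1[0] * p2[1] - p1[1] * p2[0]
--
-- def colinear(pts):
--     n = len(pts)
--     for i in range(n):
--         for j in range(n):
--             if i == j: continue
--             for k in range(n):
--                 if k == i or k == j: continue
--                 p1 = (pts[j][0] - pts[i][0], pts[j][1] - pts[i][1])
--                 p2 = (pts[k][0] - pts[i][0], pts[k][1] - pts[i][1])
--                 if cross(p1, p2) == 0:
--                     return True
--     return False
-- ===== SOURCE B (Python) =====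
-- def _gcd(a, b):
--     return a if b == 0 else _gcd(b, a % b)
--
-- def _norm(dx, dy):
--     # canonical primitive direction of a nonzero vector (unique up to sign flip)
--     g = _gcd(abs(dx), abs(dy))
--     dx //= g
--     dy //= g
--     if dx < 0 or (dx == 0 and dy < 0):
--         return (-dx, -dy)
--     return (dx, dy)
--
-- def colinear(pts):
--     n = len(pts)
--     if n < 3:
--         return False
--     for i in range(n):
--         xi, yi = pts[i]
--         seen = set()
--         for j in range(n):
--             if j == i:
--                 continue
--             dx = pts[j][0] - xi
--             dy = pts[j][1] - yi
--             if dx == 0 and dy == 0: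
--                 return True
--             d = _norm(dx, dy)
--             if d in seen:
--                 return True
--             seen.add(d)
--     return False
-- ===== Notes on version B (the rewrite author's own statement) =====
-- stated objective: faster
-- what changed: Replaces the cubic scan over all ordered index triples by a per-point pass that hashes the canonical primitive direction (gcd-reduced, sign-normalized) of every other point into a set and reports a collision, turning O(n^3) into O(n^2 log C).
import Mathlib
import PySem

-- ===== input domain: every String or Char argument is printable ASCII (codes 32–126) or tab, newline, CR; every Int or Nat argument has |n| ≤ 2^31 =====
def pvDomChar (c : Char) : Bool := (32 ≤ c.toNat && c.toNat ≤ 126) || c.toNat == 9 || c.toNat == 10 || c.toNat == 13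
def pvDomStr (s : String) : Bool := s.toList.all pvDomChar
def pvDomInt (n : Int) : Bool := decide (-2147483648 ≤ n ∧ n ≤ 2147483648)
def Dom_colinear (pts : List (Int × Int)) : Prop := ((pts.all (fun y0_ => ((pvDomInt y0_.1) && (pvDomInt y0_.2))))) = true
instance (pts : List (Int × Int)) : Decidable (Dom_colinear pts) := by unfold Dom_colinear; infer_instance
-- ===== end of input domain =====

-- B replaces A's cubic scan over all ordered index triples by a per-point pass that hashes the
-- canonical primitive direction of every other point into a set (asymptotically faster algorithm).

-- ===== PORT A =====
def pvCross (p1 p2 : Int × Int) : Int := p1.1 * p2.2 - p1.2 * p2.1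

def colinear (pts : List (Int × Int)) : Bool :=
  let n : Int := pts.length
  (PySem.List.pyRange 0 n 1).any fun i =>
    (PySem.List.pyRange 0 n 1).any fun j =>
      if i == j then false else
      (PySem.List.pyRange 0 n 1).any fun k =>
        if k == i || k == j then false else
        let pi := PySem.List.pyGetD pts i (0, 0)
        let pj := PySem.List.pyGetD pts j (0, 0)
        let pk := PySem.List.pyGetD pts k (0, 0)
        pvCross (pj.1 - pi.1, pj.2 - pi.2) (pk.1 - pi.1, pk.2 - pi.2) == 0

-- ===== PORT B =====
def pyGcd (a b : Nat) : Nat :=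
  if b = 0 then a else pyGcd b (a % b)
termination_by b
decreasing_by exact Nat.mod_lt _ (Nat.pos_of_ne_zero (by assumption))

def pvNorm (dx dy : Int) : Int × Int :=
  let g : Int := (pyGcd dx.natAbs dy.natAbs : Nat)
  let dx := PySem.Int.floordiv dx g
  let dy := PySem.Int.floordiv dy g
  if dx < 0 || (dx == 0 && dy < 0) then (-dx, -dy) else (dx, dy)

def pvInner (pts : List (Int × Int)) (i xi yi : Int) (seen : PySem.Set (Int × Int)) :
    List Int → Bool
  | [] => false
  | j :: js =>
    if j == i then pvInner pts i xi yi seen js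
    else
      let dx := (PySem.List.pyGetD pts j (0, 0)).1 - xi
      let dy := (PySem.List.pyGetD pts j (0, 0)).2 - yi
      if dx == 0 && dy == 0 then true
      else
        let d := pvNorm dx dy
        if PySem.Set.contains seen d then true
        else pvInner pts i xi yi (PySem.Set.add seen d) js

def colinear_alt (pts : List (Int × Int)) : Bool :=
  let n : Int := pts.length
  if n < 3 then false
  else
    (PySem.List.pyRange 0 n 1).any fun i =>
      let p := PySem.List.pyGetD pts i (0, 0)
      pvInner pts i p.1 p.2 PySem.Set.empty (PySem.List.pyRange 0 n 1)

-- delta vector from point i's coords to point j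

-- ===== PRECONDITION & SPEC =====
def Spec_colinear (pts : List (Int × Int)) (out : Bool) : Prop := out = colinear_alt pts
instance (pts : List (Int × Int)) (out : Bool) : Decidable (Spec_colinear pts out) := by unfold Spec_colinear; infer_instance

-- ===== CLAIM (what is proved, stated in full; the proofs are below) =====
def Claim_equal_colinear : Prop := ∀ (pts : List (Int × Int)), Dom_colinear pts → Spec_colinear pts (colinear pts)

-- ===== LEMMAS AND PROOFS =====

theorem pyGcd_eq_gcd (a b : Nat) : pyGcd a b = Nat.gcd a b := by
  induction a, b using pyGcd.induct with
  | case1 a => simp [pyGcd]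
  | case2 a b h ih =>
    rw [pyGcd, if_neg h, ih, Nat.gcd_comm b, ← Nat.gcd_rec, Nat.gcd_comm]

theorem pvNorm_spec (a b : Int) (h : ¬(a = 0 ∧ b = 0)) :
    ∃ c : Int, c ≠ 0 ∧ a = c * (pvNorm a b).1 ∧ b = c * (pvNorm a b).2 ∧
      Int.gcd (pvNorm a b).1 (pvNorm a b).2 = 1 ∧
      (0 < (pvNorm a b).1 ∨ ((pvNorm a b).1 = 0 ∧ 0 < (pvNorm a b).2)) := by
  have hg : (pyGcd a.natAbs b.natAbs : Int) = (Int.gcd a b : Int) := by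
    rw [pyGcd_eq_gcd]; rfl
  have hgpos : 0 < (Int.gcd a b : Int) := by
    have h0 : a ≠ 0 ∨ b ≠ 0 := by tauto
    exact_mod_cast Int.gcd_pos_iff.mpr h0
  have hda : (Int.gcd a b : Int) ∣ a := Int.gcd_dvd_left a b
  have hdb : (Int.gcd a b : Int) ∣ b := Int.gcd_dvd_right a b
  have hfa : PySem.Int.floordiv a (Int.gcd a b : Int) = a / (Int.gcd a b : Int) :=
    PySem.Int.floordiv_eq_ediv_of_pos hgpos
  have hfb : PySem.Int.floordiv b (Int.gcd a b : Int) = b / (Int.gcd a b : Int) :=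
    PySem.Int.floordiv_eq_ediv_of_pos hgpos
  have ha : a = (Int.gcd a b : Int) * (a / (Int.gcd a b : Int)) := (Int.mul_ediv_cancel' hda).symm
  have hb : b = (Int.gcd a b : Int) * (b / (Int.gcd a b : Int)) := (Int.mul_ediv_cancel' hdb).symm
  have hcop : Int.gcd (a / (Int.gcd a b : Int)) (b / (Int.gcd a b : Int)) = 1 :=
    Int.gcd_div_gcd_div_gcd (Int.gcd_pos_iff.mpr (by tauto))
  have hnz : ¬(a / (Int.gcd a b : Int) = 0 ∧ b / (Int.gcd a b : Int) = 0) := by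
    rintro ⟨h1, h2⟩
    rw [h1] at ha; rw [h2] at hb
    exact h ⟨by omega, by omega⟩
  have hout : pvNorm a b =
      (if a / (Int.gcd a b : Int) < 0 ∨ (a / (Int.gcd a b : Int) = 0 ∧ b / (Int.gcd a b : Int) < 0)
       then (-(a / (Int.gcd a b : Int)), -(b / (Int.gcd a b : Int)))
       else (a / (Int.gcd a b : Int), b / (Int.gcd a b : Int))) := by
    rw [pvNorm]
    simp only [hg, hfa, hfb, Bool.or_eq_true, Bool.and_eq_true, decide_eq_true_eq, beq_iff_eq]
  set g : Int := (Int.gcd a b : Int)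
  set p : Int := a / g
  set q : Int := b / g
  by_cases hc : p < 0 ∨ (p = 0 ∧ q < 0)
  · rw [hout, if_pos hc]
    refine ⟨-g, by omega, by rw [ha]; ring, by rw [hb]; ring, ?_, by omega⟩
    simpa [Int.gcd] using hcop
  · rw [hout, if_neg hc]
    refine ⟨g, by omega, ha, hb, hcop, by omega⟩

theorem canon_unique (p q r s : Int) (hx : p * s - q * r = 0)
    (h1 : Int.gcd p q = 1) (h2 : Int.gcd r s = 1)
    (c1 : 0 < p ∨ (p = 0 ∧ 0 < q)) (c2 : 0 < r ∨ (r = 0 ∧ 0 < s)) :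
    p = r ∧ q = s := by
  have hpr : p ∣ r := by
    have hd : p ∣ q * r := ⟨s, by linear_combination -hx⟩
    exact Int.dvd_of_dvd_mul_right_of_gcd_one hd h1
  have hrp : r ∣ p := by
    have hd : r ∣ s * p := ⟨q, by linear_combination hx⟩
    exact Int.dvd_of_dvd_mul_right_of_gcd_one hd h2
  have habs : p.natAbs = r.natAbs :=
    Nat.dvd_antisymm (Int.natAbs_dvd_natAbs.mpr hpr) (Int.natAbs_dvd_natAbs.mpr hrp)
  rcases c1 with hp | ⟨hp0, hq⟩
  · have hr : r = p := by omega
    subst hr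
    have hs : s = q := mul_left_cancel₀ (by omega : r ≠ 0) (by linear_combination hx)
    exact ⟨rfl, hs.symm⟩
  · have hr0 : r = 0 := by omega
    have hq1 : q = 1 := by
      have hh : Int.gcd 0 q = 1 := by rwa [hp0] at h1
      simp [Int.gcd] at hh; omega
    have hs1 : s = 1 := by
      rcases c2 with hcase | ⟨_, hs⟩
      · omega
      · have hh : Int.gcd 0 s = 1 := by rwa [hr0] at h2
        simp [Int.gcd] at hh; omega
    exact ⟨by omega, by omega⟩

theorem pvNorm_eq_iff (a b c d : Int) (hu : ¬(a = 0 ∧ b = 0)) (hv : ¬(c = 0 ∧ d = 0)) :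
    (pvNorm a b = pvNorm c d) ↔ a * d - b * c = 0 := by
  obtain ⟨e, he, hea, heb, hg1, hc1⟩ := pvNorm_spec a b hu
  obtain ⟨f, hf, hfc, hfd, hg2, hc2⟩ := pvNorm_spec c d hv
  set P := pvNorm a b with hP
  set Q := pvNorm c d with hQ
  constructor
  · intro heq
    rw [hea, heb, hfc, hfd, heq]
    ring
  · intro hx
    have hz : P.1 * Q.2 - P.2 * Q.1 = 0 := by
      have h0 : e * f * (P.1 * Q.2 - P.2 * Q.1) = 0 := by linear_combination hx - (by rw [hea, heb, hfc, hfd]; ring : a * d - b * c = e * f * (P.1 * Q.2 - P.2 * Q.1))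
      exact (mul_eq_zero.mp h0).resolve_left (mul_ne_zero he hf)
    obtain ⟨h1, h2⟩ := canon_unique _ _ _ _ hz hg1 hg2 hc1 hc2
    exact Prod.ext h1 h2

def pvD (pts : List (Int × Int)) (xi yi j : Int) : Int × Int :=
  ((PySem.List.pyGetD pts j (0, 0)).1 - xi, (PySem.List.pyGetD pts j (0, 0)).2 - yi)

def pvFilt (pts : List (Int × Int)) (i xi yi : Int) (js : List Int) : List Int :=
  js.filter (fun j => !(j == i) && !(pvD pts xi yi j == (0, 0)))

def pvDirs (pts : List (Int × Int)) (i xi yi : Int) (js : List Int) : List (Int × Int) :=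
  (pvFilt pts i xi yi js).map (fun j => pvNorm (pvD pts xi yi j).1 (pvD pts xi yi j).2)

def Collin (pts : List (Int × Int)) : Prop :=
  ∃ i j k : Int, 0 ≤ i ∧ i < pts.length ∧ 0 ≤ j ∧ j < pts.length ∧ 0 ≤ k ∧ k < pts.length ∧
    i ≠ j ∧ k ≠ i ∧ k ≠ j ∧
    pvCross (pvD pts (PySem.List.pyGetD pts i (0,0)).1 (PySem.List.pyGetD pts i (0,0)).2 j)
            (pvD pts (PySem.List.pyGetD pts i (0,0)).1 (PySem.List.pyGetD pts i (0,0)).2 k) = 0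

theorem A_iff (pts : List (Int × Int)) : colinear pts = true ↔ Collin pts := by
  unfold colinear Collin pvD
  simp
  constructor
  · rintro ⟨i, ⟨hi0, hin⟩, j, ⟨hj0, hjn⟩, hij, k, ⟨hk0, hkn⟩, ⟨hki, hkj⟩, hc⟩
    exact ⟨i, hi0, hin, j, hj0, hjn, k, hk0, hkn, hij, hki, hkj, hc⟩
  · rintro ⟨i, hi0, hin, j, hj0, hjn, k, hk0, hkn, hij, hki, hkj, hc⟩
    exact ⟨i, ⟨hi0, hin⟩, j, ⟨hj0, hjn⟩, hij, k, ⟨hk0, hkn⟩, ⟨hki, hkj⟩, hc⟩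

theorem pvInner_iff (pts : List (Int × Int)) (i xi yi : Int) (js : List Int)
    (seen : PySem.Set (Int × Int)) :
    pvInner pts i xi yi seen js = true ↔
      ((∃ j ∈ js, j ≠ i ∧ pvD pts xi yi j = (0, 0)) ∨
       (∃ j ∈ js, j ≠ i ∧ pvD pts xi yi j ≠ (0, 0) ∧
          pvNorm (pvD pts xi yi j).1 (pvD pts xi yi j).2 ∈ seen) ∨
       ¬ (pvDirs pts i xi yi js).Nodup) := by
  induction js generalizing seen with
  | nil => simp [pvInner, pvDirs, pvFilt]
  | cons j js ih =>
    rw [pvInner]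
    by_cases hji : j = i
    · rw [if_pos (by simpa using hji), ih]
      have hfil : pvFilt pts i xi yi (j :: js) = pvFilt pts i xi yi js := by
        unfold pvFilt; rw [List.filter_cons_of_neg (by simp [hji])]
      have hdir : pvDirs pts i xi yi (j :: js) = pvDirs pts i xi yi js := by
        unfold pvDirs; rw [hfil]
      rw [hdir]
      constructor
      · rintro (⟨x, hx, h⟩ | ⟨x, hx, h⟩ | h)
        · exact Or.inl ⟨x, List.mem_cons_of_mem _ hx, h⟩
        · exact Or.inr (Or.inl ⟨x, List.mem_cons_of_mem _ hx, h⟩)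
        · exact Or.inr (Or.inr h)
      · rintro (⟨x, hx, h⟩ | ⟨x, hx, h⟩ | h)
        · rcases List.mem_cons.mp hx with rfl | hx
          · exact absurd hji h.1
          · exact Or.inl ⟨x, hx, h⟩
        · rcases List.mem_cons.mp hx with rfl | hx
          · exact absurd hji h.1
          · exact Or.inr (Or.inl ⟨x, hx, h⟩)
        · exact Or.inr (Or.inr h)
    · rw [if_neg (by simpa using hji)]
      simp only
      by_cases hz : pvD pts xi yi j = (0, 0)
      · rw [if_pos (by simp only [pvD, Prod.mk.injEq] at hz; simp [hz.1, hz.2])]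
        simp only [true_iff]
        exact Or.inl ⟨j, List.mem_cons_self, hji, hz⟩
      · have hzc : ¬(((PySem.List.pyGetD pts j (0, 0)).1 - xi == 0) &&
            ((PySem.List.pyGetD pts j (0, 0)).2 - yi == 0)) = true := by
          simp only [pvD, Prod.mk.injEq] at hz
          simp only [Bool.and_eq_true, beq_iff_eq]
          omega
        rw [if_neg hzc]
        have hfil : pvFilt pts i xi yi (j :: js) = j :: pvFilt pts i xi yi js := by
          unfold pvFilt
          rw [List.filter_cons_of_pos (by simp [hji, hz])]
        have hdir : pvDirs pts i xi yi (j :: js) =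
            pvNorm (pvD pts xi yi j).1 (pvD pts xi yi j).2 :: pvDirs pts i xi yi js := by
          unfold pvDirs; rw [hfil, List.map_cons]
        have hdn : (pvDirs pts i xi yi (j :: js)).Nodup ↔
            (pvNorm (pvD pts xi yi j).1 (pvD pts xi yi j).2 ∉ pvDirs pts i xi yi js ∧
             (pvDirs pts i xi yi js).Nodup) := by
          rw [hdir, List.nodup_cons]
        by_cases hseen : pvNorm (pvD pts xi yi j).1 (pvD pts xi yi j).2 ∈ seen
        · rw [if_pos (by simpa [PySem.Set.contains] using hseen)]
          simp only [true_iff]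
          exact Or.inr (Or.inl ⟨j, List.mem_cons_self, hji, hz, hseen⟩)
        · rw [if_neg (by simpa [PySem.Set.contains] using hseen)]
          rw [ih]
          constructor
          · rintro (⟨x, hx, h⟩ | ⟨x, hx, h1, h2, h3⟩ | h)
            · exact Or.inl ⟨x, List.mem_cons_of_mem _ hx, h⟩
            · rcases (PySem.Set.mem_add _ _ _).mp h3 with h3 | h3
              · exact Or.inr (Or.inl ⟨x, List.mem_cons_of_mem _ hx, h1, h2, h3⟩)
              · refine Or.inr (Or.inr (fun hnd => ?_))
                have hxin : pvNorm (pvD pts xi yi x).1 (pvD pts xi yi x).2 ∈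
                    pvDirs pts i xi yi js :=
                  List.mem_map_of_mem (List.mem_filter.mpr ⟨hx, by simp [h1, h2]⟩)
                exact (hdn.mp hnd).1 (h3 ▸ hxin)
            · exact Or.inr (Or.inr (fun hnd => h (hdn.mp hnd).2))
          · rintro (⟨x, hx, h⟩ | ⟨x, hx, h1, h2, h3⟩ | h)
            · rcases List.mem_cons.mp hx with rfl | hx
              · exact absurd h.2 hz
              · exact Or.inl ⟨x, hx, h⟩
            · rcases List.mem_cons.mp hx with rfl | hx
              · exact absurd h3 hseen
              · exact Or.inr (Or.inl ⟨x, hx, h1, h2, (PySem.Set.mem_add _ _ _).mpr (Or.inl h3)⟩)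
            · by_cases hmem : pvNorm (pvD pts xi yi j).1 (pvD pts xi yi j).2 ∈
                  pvDirs pts i xi yi js
              · obtain ⟨x, hxf, hxe⟩ := List.mem_map.mp hmem
                obtain ⟨hxm, hxp⟩ := List.mem_filter.mp hxf
                simp only [Bool.and_eq_true, Bool.not_eq_true', beq_eq_false_iff_ne, ne_eq] at hxp
                exact Or.inr (Or.inl ⟨x, hxm, hxp.1, hxp.2,
                  (PySem.Set.mem_add _ _ _).mpr (Or.inr hxe)⟩)
              · exact Or.inr (Or.inr (fun hnd => h (hdn.mpr ⟨hmem, hnd⟩)))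

def BChar (pts : List (Int × Int)) : Prop :=
  3 ≤ (pts.length : Int) ∧ ∃ i : Int, 0 ≤ i ∧ i < (pts.length : Int) ∧
    ((∃ j ∈ PySem.List.pyRange 0 (pts.length : Int) 1, j ≠ i ∧
        pvD pts (PySem.List.pyGetD pts i (0,0)).1 (PySem.List.pyGetD pts i (0,0)).2 j = (0, 0)) ∨
     ¬ (pvDirs pts i (PySem.List.pyGetD pts i (0,0)).1 (PySem.List.pyGetD pts i (0,0)).2
          (PySem.List.pyRange 0 (pts.length : Int) 1)).Nodup)

theorem B_iff (pts : List (Int × Int)) : colinear_alt pts = true ↔ BChar pts := by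
  unfold colinear_alt BChar
  by_cases h3 : (pts.length : Int) < 3
  · simp only [if_pos h3, Bool.false_eq_true, false_iff]
    rintro ⟨hn, _⟩
    omega
  · simp only [if_neg h3, List.any_eq_true, PySem.List.mem_pyRange_one]
    constructor
    · rintro ⟨i, ⟨hi0, hin⟩, hi⟩
      simp only [pvInner_iff] at hi
      rcases hi with h | h | h
      · exact ⟨by omega, i, hi0, hin, Or.inl (by simpa [PySem.List.mem_pyRange_one] using h)⟩
      · obtain ⟨j, _, _, _, hmem⟩ := h
        exact absurd hmem (by simp [PySem.Set.empty])
      · exact ⟨by omega, i, hi0, hin, Or.inr h⟩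
    · rintro ⟨hn, i, hi0, hin, h⟩
      refine ⟨i, ⟨hi0, hin⟩, ?_⟩
      simp only [pvInner_iff]
      rcases h with h | h
      · exact Or.inl (by simpa [PySem.List.mem_pyRange_one] using h)
      · exact Or.inr (Or.inr h)

theorem main_iff (pts : List (Int × Int)) : Collin pts ↔ BChar pts := by
  unfold Collin BChar
  constructor
  · rintro ⟨i, j, k, hi0, hin, hj0, hjn, hk0, hkn, hij, hki, hkj, hc⟩
    refine ⟨by omega, i, hi0, hin, ?_⟩
    set xi := (PySem.List.pyGetD pts i (0,0)).1
    set yi := (PySem.List.pyGetD pts i (0,0)).2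
    by_cases hzj : pvD pts xi yi j = (0, 0)
    · exact Or.inl ⟨j, PySem.List.mem_pyRange_one.mpr ⟨hj0, hjn⟩, fun h => hij h.symm, hzj⟩
    · by_cases hzk : pvD pts xi yi k = (0, 0)
      · exact Or.inl ⟨k, PySem.List.mem_pyRange_one.mpr ⟨hk0, hkn⟩, hki, hzk⟩
      · refine Or.inr (fun hnd => ?_)
        have hfnd : (pvFilt pts i xi yi (PySem.List.pyRange 0 (pts.length : Int) 1)).Nodup :=
          List.Nodup.filter _ (PySem.List.nodup_pyRange_one 0 _)
        have hinj := (List.nodup_map_iff_inj_on hfnd).mp hnd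
        have hjf : j ∈ pvFilt pts i xi yi (PySem.List.pyRange 0 (pts.length : Int) 1) :=
          List.mem_filter.mpr ⟨PySem.List.mem_pyRange_one.mpr ⟨hj0, hjn⟩,
            by simp [Ne.symm hij, hzj]⟩
        have hkf : k ∈ pvFilt pts i xi yi (PySem.List.pyRange 0 (pts.length : Int) 1) :=
          List.mem_filter.mpr ⟨PySem.List.mem_pyRange_one.mpr ⟨hk0, hkn⟩, by simp [hki, hzk]⟩
        have heq : pvNorm (pvD pts xi yi j).1 (pvD pts xi yi j).2 =
            pvNorm (pvD pts xi yi k).1 (pvD pts xi yi k).2 := by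
          rw [pvNorm_eq_iff _ _ _ _ (by simp [Prod.ext_iff] at hzj ⊢; omega)
            (by simp [Prod.ext_iff] at hzk ⊢; omega)]
          simpa [pvCross] using hc
        exact hkj (hinj k hkf j hjf heq.symm)
  · rintro ⟨hn, i, hi0, hin, h⟩
    set xi := (PySem.List.pyGetD pts i (0,0)).1
    set yi := (PySem.List.pyGetD pts i (0,0)).2
    rcases h with ⟨j, hjmem, hji, hz⟩ | hdup
    · obtain ⟨hj0, hjn⟩ := PySem.List.mem_pyRange_one.mp hjmem
      have hk : ∃ k : Int, 0 ≤ k ∧ k < (pts.length : Int) ∧ k ≠ i ∧ k ≠ j := by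
        by_cases c0 : (0 : Int) ≠ i ∧ (0 : Int) ≠ j
        · exact ⟨0, by omega, by omega, c0.1, c0.2⟩
        · by_cases c1 : (1 : Int) ≠ i ∧ (1 : Int) ≠ j
          · exact ⟨1, by omega, by omega, c1.1, c1.2⟩
          · refine ⟨2, by omega, by omega, ?_, ?_⟩ <;>
            · simp only [not_and_or, not_not] at c0 c1
              omega
      obtain ⟨k, hk0, hkn, hki, hkj⟩ := hk
      exact ⟨i, j, k, hi0, hin, hj0, hjn, hk0, hkn, fun h => hji h.symm, hki, hkj,
        by rw [hz]; simp [pvCross]⟩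
    · have hfnd : (pvFilt pts i xi yi (PySem.List.pyRange 0 (pts.length : Int) 1)).Nodup :=
        List.Nodup.filter _ (PySem.List.nodup_pyRange_one 0 _)
      have hni := mt (List.nodup_map_iff_inj_on hfnd).mpr hdup
      push_neg at hni
      obtain ⟨x, hx, y, hy, hfxy, hxy⟩ := hni
      obtain ⟨hxr, hxp⟩ := List.mem_filter.mp hx
      obtain ⟨hyr, hyp⟩ := List.mem_filter.mp hy
      obtain ⟨hx0, hxn⟩ := PySem.List.mem_pyRange_one.mp hxr
      obtain ⟨hy0, hyn⟩ := PySem.List.mem_pyRange_one.mp hyr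
      simp only [Bool.and_eq_true, Bool.not_eq_true', beq_eq_false_iff_ne, ne_eq] at hxp hyp
      have hc : pvCross (pvD pts xi yi x) (pvD pts xi yi y) = 0 := by
        have := (pvNorm_eq_iff _ _ _ _ (by have := hxp.2; simp [Prod.ext_iff] at this ⊢; omega)
          (by have := hyp.2; simp [Prod.ext_iff] at this ⊢; omega)).mp hfxy
        simpa [pvCross] using this
      exact ⟨i, x, y, hi0, hin, hx0, hxn, hy0, hyn, fun h => hxp.1 h.symm, hyp.1,
        fun h => hxy h.symm, hc⟩

theorem colinear_eq_alt (pts : List (Int × Int)) : colinear pts = colinear_alt pts :=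
  Bool.eq_iff_iff.mpr ((A_iff pts).trans ((main_iff pts).trans (B_iff pts).symm))

-- ===== VERDICT (by name: the statement is the Claim_ definition above) =====
theorem colinear_spec : Claim_equal_colinear := by
  intro pts _
  exact colinear_eq_alt pts
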